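-- pv_equiv track=rewrite | github.com/Byongho96/algorithm_practice | Baekjoon/5397_키로거.py | solution
-- ===== SOURCE A (Python) =====
-- def solution(N, passwords):
--     answers = []
--
--     for password in passwords:
--         left = []
--         right = []
--
--         for p in password:
--             if p == "<":
--                 if left:
--                     right.append(left.pop())
--             elif p == ">":
--                 if right:
--                     left.append(right.pop())
--             elif p == "-":
--                 if left:
--                     left.pop()
--             else:
--                 left.append(p)
--
--         answers.append(''.join(left) + ''.join(right[::-1]))
--
--     return answers
-- ===== SOURCE B (Python) =====
-- def solution(N, passwords):
--     answers = []
--     for password in passwords: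
--         buf = []
--         cursor = 0
--         for p in password:
--             if p == "<":
--                 if cursor > 0:
--                     cursor -= 1
--             elif p == ">":
--                 if cursor < len(buf):
--                     cursor += 1
--             elif p == "-":
--                 if cursor > 0:
--                     del buf[cursor - 1]
--                     cursor -= 1
--             else:
--                 buf.insert(cursor, p)
--                 cursor += 1
--         answers.append(''.join(buf))
--     return answers
-- ===== Notes on version B (the rewrite author's own statement) =====
-- stated objective: alternative
-- what changed: Replaces the two-stack (left/right) simulation with a single buffer list plus an integer cursor: '<'/'>' only move the cursor, '-' deletes before the cursor, a character is inserted at the cursor, and the answer is the buffer joined directly with no reversal.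
import Mathlib
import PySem

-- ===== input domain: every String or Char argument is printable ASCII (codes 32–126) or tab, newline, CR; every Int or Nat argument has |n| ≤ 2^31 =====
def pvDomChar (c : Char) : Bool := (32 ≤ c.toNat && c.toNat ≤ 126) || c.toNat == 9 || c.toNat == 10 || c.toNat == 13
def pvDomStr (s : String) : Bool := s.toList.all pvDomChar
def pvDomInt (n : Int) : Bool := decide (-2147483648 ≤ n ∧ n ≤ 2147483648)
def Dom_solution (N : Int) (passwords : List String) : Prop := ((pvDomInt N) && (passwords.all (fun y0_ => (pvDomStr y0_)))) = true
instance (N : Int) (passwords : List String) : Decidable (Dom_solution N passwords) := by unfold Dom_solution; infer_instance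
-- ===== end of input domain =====

-- B replaces A's two-stack simulation by a single buffer with a cursor index; return value only, no mutation.

-- ===== PORT A =====
-- state: (left, right) stacks, each stored top-at-head (Python's list.append/pop on the
-- end become cons/uncons on the head); join(left) = left.reverse, join(right[::-1]) = right.
def stepA (st : List Char × List Char) (p : Char) : List Char × List Char :=
  if p = '<' then
    match st.1 with
    | [] => st
    | x :: ls => (ls, x :: st.2)
  else if p = '>' then
    match st.2 with
    | [] => st
    | x :: rs => (x :: st.1, rs)
  else if p = '-' then
    match st.1 with
    | [] => st
    | _ :: ls => (ls, st.2)
  else (p :: st.1, st.2)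

def solution (N : Int) (passwords : List String) : List String :=
  passwords.map (fun password =>
    let st := password.toList.foldl stepA ([], [])
    String.ofList (st.1.reverse ++ st.2))

-- ===== PORT B =====
-- state: (buffer, cursor); Python's buf.insert(cursor,p) / del buf[cursor-1] become
-- take/drop surgery at the cursor (the guards keep the cursor in [0, len buf]).
def stepB (st : List Char × Nat) (p : Char) : List Char × Nat :=
  if p = '<' then
    if 0 < st.2 then (st.1, st.2 - 1) else st
  else if p = '>' then
    if st.2 < st.1.length then (st.1, st.2 + 1) else st
  else if p = '-' then
    if 0 < st.2 then (st.1.take (st.2 - 1) ++ st.1.drop st.2, st.2 - 1) else st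
  else (st.1.take st.2 ++ p :: st.1.drop st.2, st.2 + 1)

def solution_alt (N : Int) (passwords : List String) : List String :=
  passwords.map (fun password =>
    let st := password.toList.foldl stepB ([], 0)
    String.ofList st.1)

-- ===== PRECONDITION & SPEC =====
def Spec_solution (N : Int) (passwords : List String) (out : List String) : Prop := out = solution_alt N passwords
instance (N : Int) (passwords : List String) (out : List String) : Decidable (Spec_solution N passwords out) := by unfold Spec_solution; infer_instance

-- ===== CLAIM (what is proved, stated in full; the proofs are below) =====
def Claim_equal_solution : Prop := ∀ (N : Int) (passwords : List String), Dom_solution N passwords → Spec_solution N passwords (solution N passwords)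

-- ===== LEMMAS AND PROOFS =====

/-- The abstraction from A's two-stack state to B's buffer+cursor state. -/
def absSt (st : List Char × List Char) : List Char × Nat :=
  (st.1.reverse ++ st.2, st.1.length)

theorem take_rev_append (l r : List Char) : (l.reverse ++ r).take l.length = l.reverse := by
  simpa using List.take_left' (l₁ := l.reverse) (l₂ := r) (by simp)

theorem drop_rev_append (l r : List Char) : (l.reverse ++ r).drop l.length = r := by
  simpa using List.drop_left' (l₁ := l.reverse) (l₂ := r) (by simp)

theorem stepB_absSt (st : List Char × List Char) (p : Char) :
    stepB (absSt st) p = absSt (stepA st p) := by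
  obtain ⟨l, r⟩ := st
  by_cases h1 : p = '<'
  · cases l with
    | nil => simp [stepA, stepB, absSt, h1]
    | cons x ls => simp [stepA, stepB, absSt, h1]
  · by_cases h2 : p = '>'
    · cases r with
      | nil => simp [stepA, stepB, absSt, h1, h2]
      | cons x rs => simp [stepA, stepB, absSt, h1, h2]
    · by_cases h3 : p = '-'
      · cases l with
        | nil => simp [stepA, stepB, absSt, h1, h2, h3]
        | cons x ls =>
          have ht : (ls.reverse ++ x :: r).take ls.length = ls.reverse := by
            simpa using List.take_left' (l₁ := ls.reverse) (l₂ := x :: r) (by simp)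
          have hd : (ls.reverse ++ x :: r).drop (ls.length + 1) = r := by
            have h' := List.drop_left (l₁ := ls.reverse ++ [x]) (l₂ := r)
            simpa [List.append_assoc] using h' 
          simp [stepA, stepB, absSt, h2, h3, ht, hd]
      · have ht := take_rev_append l r
        have hd := drop_rev_append l r
        simp [stepA, stepB, absSt, h1, h2, h3, ht, hd]


theorem foldl_absSt (cs : List Char) (st : List Char × List Char) :
    cs.foldl stepB (absSt st) = absSt (cs.foldl stepA st) := by
  induction cs generalizing st with
  | nil => rfl
  | cons c cs ih => simp only [List.foldl_cons, stepB_absSt, ih]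

-- ===== VERDICT (by name: the statement is the Claim_ definition above) =====
theorem solution_spec : Claim_equal_solution := by
  intro N passwords _
  unfold Spec_solution solution solution_alt
  refine List.map_congr_left (fun password _ => ?_)
  have h := foldl_absSt password.toList ([], [])
  simp only [absSt, List.reverse_nil, List.nil_append, List.length_nil] at h
  rw [h]
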